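-- pv_equiv track=rewrite | github.com/harshad018/AI-Lab | final/nqueens.py | get_best_neighbour
-- ===== SOURCE A (Python) =====
-- def compute_heurestic(state):
--     n = len(state)
--     h = 0
--
--
--     for i in range(n):
--         for j in range(i+1, n):
--
--             if state[i] == state[j] or abs(state[i] - state[j]) == abs(i - j):
--
--                 h += 1
--
--     return h
--
-- def get_best_neighbour(state):
--
--     n = len(state)
--     best_state = state[:]
--     min_h = compute_heurestic(state)
--
--     for col in range(n):
--         original_row = state[col]
--
--         for row in range(n):
--             if row != original_row:
--                 state[col] = row
--                 h = compute_heurestic(state)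
--
--                 if h < min_h:
--                     min_h = h
--                     best_state = state[:]
--
--         state[col] = original_row
--
--     return best_state, min_h
-- ===== SOURCE B (Python) =====
-- def get_best_neighbour(state):
--     # Delta evaluation: score each candidate move in O(n) from per-queen conflict
--     # counts instead of re-scoring the whole board (O(n^2)) for every move.
--     n = len(state)
--
--     def conflicts(col, val):
--         # number of columns j != col whose queen clashes with a queen at (col, val)
--         c = 0
--         for j in range(n):
--             if j != col and (state[j] == val or abs(state[j] - val) == abs(j - col)):
--                 c += 1
--         return c
--
--     base = sum(conflicts(i, state[i]) for i in range(n)) // 2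
--     best_state, min_h = list(state), base
--     for col in range(n):
--         removed = conflicts(col, state[col])
--         for row in range(n):
--             if row != state[col]:
--                 h = base - removed + conflicts(col, row)
--                 if h < min_h:
--                     min_h = h
--                     best_state = state[:col] + [row] + state[col + 1:]
--     return best_state, min_h
-- ===== Notes on version B (the rewrite author's own statement) =====
-- stated objective: faster
-- what changed: Instead of re-scoring the whole board with the pairwise heuristic for every candidate move, B scores the board once and evaluates each move by a delta: new h = base - conflicts(col, old_row) + conflicts(col, new_row), with conflicts computed by a single O(n) scan.
import Mathlib
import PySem

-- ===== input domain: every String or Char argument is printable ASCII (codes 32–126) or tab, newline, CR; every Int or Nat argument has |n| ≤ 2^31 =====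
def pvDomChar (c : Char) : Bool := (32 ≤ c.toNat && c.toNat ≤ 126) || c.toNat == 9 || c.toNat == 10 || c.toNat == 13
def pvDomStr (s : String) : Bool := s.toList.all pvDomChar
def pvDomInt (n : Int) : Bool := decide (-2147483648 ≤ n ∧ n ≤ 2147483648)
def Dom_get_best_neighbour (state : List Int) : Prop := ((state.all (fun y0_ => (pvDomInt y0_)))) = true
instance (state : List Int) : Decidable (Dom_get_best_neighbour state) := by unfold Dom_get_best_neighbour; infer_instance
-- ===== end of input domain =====

-- B replaces A's full re-scoring of every neighbour (O(n^2) per move, O(n^4) total) by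
-- delta evaluation from per-queen conflict counts (O(n) per move, O(n^3) total).
-- A temporarily writes into its argument list but always restores it before returning,
-- so neither port mutates; the equivalence is about the return value.

-- ===== PORT A =====
-- every index read below comes from range(len(state)), so Python's state[i] is the in-range read pyGetD
def compute_heurestic (state : List Int) : Int :=
  let n := state.length
  (PySem.List.pyRange 0 (n : Int)).foldl (fun h i =>
    (PySem.List.pyRange (i + 1) (n : Int)).foldl (fun h j =>
      if (PySem.List.pyGetD state i 0 == PySem.List.pyGetD state j 0)
          || (|PySem.List.pyGetD state i 0 - PySem.List.pyGetD state j 0| == |i - j|)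
      then h + 1 else h) h) 0

def get_best_neighbour (state : List Int) : List Int × Int :=
  let n := state.length
  let best_state := state                  -- state[:]
  let min_h := compute_heurestic state
  (PySem.List.pyRange 0 (n : Int)).foldl (fun acc col =>
    let original_row := PySem.List.pyGetD state col 0
    (PySem.List.pyRange 0 (n : Int)).foldl (fun acc row =>
      if row ≠ original_row then
        -- state[col] = row  (col is a valid non-negative index, so this is List.set);
        -- A restores state[col] after the loop, so later iterations read the original list
        let st := state.set col.toNat row
        let h := compute_heurestic st
        if h < acc.2 then (st, h) else acc
      else acc) acc) (best_state, min_h)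

-- ===== PORT B =====
def pv_conflicts (state : List Int) (n : Int) (col : Int) (val : Int) : Int :=
  (PySem.List.pyRange 0 n).foldl (fun c j =>
    if (j != col) && ((PySem.List.pyGetD state j 0 == val)
        || (|PySem.List.pyGetD state j 0 - val| == |j - col|))
    then c + 1 else c) 0

def get_best_neighbour_alt (state : List Int) : List Int × Int :=
  let n := (state.length : Int)
  let base := PySem.Int.floordiv
    (((PySem.List.pyRange 0 n).map
        (fun i => pv_conflicts state n i (PySem.List.pyGetD state i 0))).sum) 2
  (PySem.List.pyRange 0 n).foldl (fun acc col =>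
    let removed := pv_conflicts state n col (PySem.List.pyGetD state col 0)
    (PySem.List.pyRange 0 n).foldl (fun acc row =>
      if row ≠ PySem.List.pyGetD state col 0 then
        let h := base - removed + pv_conflicts state n col row
        if h < acc.2 then
          (PySem.List.slice state none (some col) ++ [row]
             ++ PySem.List.slice state (some (col + 1)) none, h)
        else acc
      else acc) acc) (state, base)

-- ===== PRECONDITION & SPEC =====
def Spec_get_best_neighbour (state : List Int) (out : List Int × Int) : Prop := out = get_best_neighbour_alt state
instance (state : List Int) (out : List Int × Int) : Decidable (Spec_get_best_neighbour state out) := by unfold Spec_get_best_neighbour; infer_instance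

-- ===== CLAIM (what is proved, stated in full; the proofs are below) =====
def Claim_equal_get_best_neighbour : Prop := ∀ (state : List Int), Dom_get_best_neighbour state → Spec_get_best_neighbour state (get_best_neighbour state)

-- ===== LEMMAS AND PROOFS =====
-- proof-side abbreviations: board size as Int, pair/point conflict indicators, and the
-- Finset-sum forms of A's heuristic and B's conflict counter
lemma pv_sum_pyRange (g : Int → Int) (b : Int) : ∀ (a : Int),
    ((PySem.List.pyRange a b).map g).sum = ∑ j ∈ Finset.Ico a b, g j := by
  suffices H : ∀ (k : Nat) (a : Int), (b - a).toNat = k →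
      ((PySem.List.pyRange a b).map g).sum = ∑ j ∈ Finset.Ico a b, g j by
    exact fun a => H _ a rfl
  intro k
  induction k with
  | zero =>
    intro a hk
    rw [PySem.List.pyRange_one_eq_nil (by omega), Finset.Ico_eq_empty (by omega)]
    simp
  | succ k ih =>
    intro a hk
    have hab : a < b := by omega
    have hins : Finset.Ico a b = insert a (Finset.Ico (a + 1) b) := by
      ext x; simp [Finset.mem_Ico, Finset.mem_insert]; omega
    rw [PySem.List.pyRange_one_cons hab, hins,
      Finset.sum_insert (by simp [Finset.mem_Ico])]
    simp [ih (a + 1) (by omega)]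

lemma pv_count (p : Int → Bool) (a b c : Int) :
    (PySem.List.pyRange a b).foldl (fun c x => if p x then c + 1 else c) c
      = c + ∑ j ∈ Finset.Ico a b, (if p j then (1 : Int) else 0) := by
  rw [PySem.List.foldl_count_if, ← PySem.List.sum_map_ite_one_zero, pv_sum_pyRange]
def pvN (s : List Int) : Int := (s.length : Int)

def pvF (s : List Int) (i j : Int) : Int :=
  if PySem.List.pyGetD s i 0 = PySem.List.pyGetD s j 0 ∨
      |PySem.List.pyGetD s i 0 - PySem.List.pyGetD s j 0| = |i - j| then 1 else 0

def pvG (s : List Int) (col val j : Int) : Int :=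
  if j ≠ col ∧ (PySem.List.pyGetD s j 0 = val ∨
      |PySem.List.pyGetD s j 0 - val| = |j - col|) then 1 else 0

noncomputable def pvCHsq (s : List Int) : Int :=
  ∑ i ∈ Finset.Ico 0 (pvN s), ∑ j ∈ Finset.Ico 0 (pvN s), if i < j then pvF s i j else 0

noncomputable def pvRest (s : List Int) (col : Int) : Int :=
  ∑ i ∈ Finset.Ico 0 (pvN s), ∑ j ∈ Finset.Ico 0 (pvN s),
    if i < j ∧ i ≠ col ∧ j ≠ col then pvF s i j else 0

noncomputable def pvCF (s : List Int) (col v : Int) : Int :=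
  ∑ j ∈ Finset.Ico 0 (pvN s), pvG s col v j

-- step 4: conflicts characterization
lemma pv_CF_eq (s : List Int) (col v : Int) :
    pv_conflicts s (pvN s) col v = pvCF s col v := by
  unfold pv_conflicts pvCF
  rw [pv_count]
  simp only [zero_add]
  apply Finset.sum_congr rfl
  intro j _
  simp [pvG, bne_iff_ne]

-- step 3: compute_heurestic characterization
lemma pv_CH_eq (s : List Int) :
    compute_heurestic s
      = ∑ i ∈ Finset.Ico 0 (pvN s), ∑ j ∈ Finset.Ico (i + 1) (pvN s), pvF s i j := by
  rw [show compute_heurestic s = (PySem.List.pyRange 0 (s.length : Int)).foldl (fun h i =>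
    (PySem.List.pyRange (i + 1) (s.length : Int)).foldl (fun h j =>
      if (PySem.List.pyGetD s i 0 == PySem.List.pyGetD s j 0)
          || (|PySem.List.pyGetD s i 0 - PySem.List.pyGetD s j 0| == |i - j|)
      then h + 1 else h) h) 0 from rfl]
  have hstep : (fun (h i : Int) =>
      (PySem.List.pyRange (i + 1) (s.length : Int)).foldl (fun h j =>
        if (PySem.List.pyGetD s i 0 == PySem.List.pyGetD s j 0)
            || (|PySem.List.pyGetD s i 0 - PySem.List.pyGetD s j 0| == |i - j|)
        then h + 1 else h) h)
      = fun (h i : Int) => h + ∑ j ∈ Finset.Ico (i + 1) (pvN s), pvF s i j := by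
    funext h i
    rw [pv_count]
    congr 1
    apply Finset.sum_congr rfl
    intro j _
    simp [pvF]
  rw [hstep, PySem.List.foldl_add, pv_sum_pyRange]
  simp [pvN]
lemma pvF_symm (s : List Int) (i j : Int) : pvF s i j = pvF s j i := by
  unfold pvF
  apply if_congr _ rfl rfl
  rw [abs_sub_comm (PySem.List.pyGetD s i 0), abs_sub_comm i j, eq_comm]

lemma pv_guard (u : Int → Int) (i N : Int) (hi : 0 ≤ i) :
    ∑ j ∈ Finset.Ico (i + 1) N, u j = ∑ j ∈ Finset.Ico 0 N, if i < j then u j else 0 := by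
  rw [← Finset.sum_filter]
  apply Finset.sum_congr _ (fun _ _ => rfl)
  ext x; simp [Finset.mem_Ico, Finset.mem_filter]; omega

-- CH in square form
lemma pv_CH_sq (s : List Int) : compute_heurestic s = pvCHsq s := by
  rw [pv_CH_eq]
  unfold pvCHsq
  apply Finset.sum_congr rfl
  intro i hi
  exact pv_guard _ _ _ (Finset.mem_Ico.mp hi).1
lemma pv_split (s : List Int) (col : Int) (hc : col ∈ Finset.Ico 0 (pvN s)) :
    pvCHsq s = pvRest s col
      + (∑ j ∈ Finset.Ico 0 (pvN s), if col < j then pvF s col j else 0)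
      + (∑ i ∈ Finset.Ico 0 (pvN s), if i < col then pvF s i col else 0) := by
  unfold pvCHsq pvRest
  have key : ∀ i j : Int, (if i < j then pvF s i j else 0)
      = (if i < j ∧ i ≠ col ∧ j ≠ col then pvF s i j else 0)
        + (if i = col then (if i < j then pvF s i j else 0) else 0)
        + (if j = col then (if i < j then pvF s i j else 0) else 0) := by
    intro i j
    by_cases h1 : i = col <;> by_cases h2 : j = col <;>
      by_cases h3 : i < j <;> simp_all
  calc ∑ i ∈ Finset.Ico 0 (pvN s), ∑ j ∈ Finset.Ico 0 (pvN s), (if i < j then pvF s i j else 0)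
      = ∑ i ∈ Finset.Ico 0 (pvN s), ∑ j ∈ Finset.Ico 0 (pvN s),
        ((if i < j ∧ i ≠ col ∧ j ≠ col then pvF s i j else 0)
          + (if i = col then (if i < j then pvF s i j else 0) else 0)
          + (if j = col then (if i < j then pvF s i j else 0) else 0)) := by
        exact Finset.sum_congr rfl fun i _ => Finset.sum_congr rfl fun j _ => key i j
    _ = (∑ i ∈ Finset.Ico 0 (pvN s), ∑ j ∈ Finset.Ico 0 (pvN s),
          (if i < j ∧ i ≠ col ∧ j ≠ col then pvF s i j else 0))
        + (∑ i ∈ Finset.Ico 0 (pvN s), ∑ j ∈ Finset.Ico 0 (pvN s),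
          (if i = col then (if i < j then pvF s i j else 0) else 0))
        + (∑ i ∈ Finset.Ico 0 (pvN s), ∑ j ∈ Finset.Ico 0 (pvN s),
          (if j = col then (if i < j then pvF s i j else 0) else 0)) := by
        simp [Finset.sum_add_distrib]
    _ = _ := by
        congr 1
        · congr 1
          -- middle term: only i = col survives
          have : ∀ i ∈ Finset.Ico 0 (pvN s),
              (∑ j ∈ Finset.Ico 0 (pvN s), (if i = col then (if i < j then pvF s i j else 0) else 0))
                = (if i = col then (∑ j ∈ Finset.Ico 0 (pvN s), if col < j then pvF s col j else 0) else 0) := by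
            intro i _
            by_cases h : i = col <;> simp [h]
          rw [Finset.sum_congr rfl this, Finset.sum_ite_eq' _ col, if_pos hc]
        · -- last term: only j = col survives
          have : ∀ i ∈ Finset.Ico 0 (pvN s),
              (∑ j ∈ Finset.Ico 0 (pvN s), (if j = col then (if i < j then pvF s i j else 0) else 0))
                = (if i < col then pvF s i col else 0) := by
            intro i _
            rw [Finset.sum_ite_eq' _ col, if_pos hc]
          exact Finset.sum_congr rfl this
lemma pv_get_set_ne (s : List Int) (col v j : Int) (hc : 0 ≤ col) (hj : 0 ≤ j)
    (hne : j ≠ col) : PySem.List.pyGetD (s.set col.toNat v) j 0 = PySem.List.pyGetD s j 0 := by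
  rw [PySem.List.pyGetD_of_nonneg _ _ hj, PySem.List.pyGetD_of_nonneg _ _ hj]
  have : col.toNat ≠ j.toNat := by omega
  simp [List.getD, List.getElem?_set_ne this]

lemma pv_get_set_self (s : List Int) (col v : Int) (hc : 0 ≤ col) (hlt : col < pvN s) :
    PySem.List.pyGetD (s.set col.toNat v) col 0 = v := by
  rw [PySem.List.pyGetD_of_nonneg _ _ hc]
  have : col.toNat < s.length := by unfold pvN at hlt; omega
  simp [List.getD, this]

lemma pv_set_self (s : List Int) (col : Int) (hc : 0 ≤ col) (hlt : col < pvN s) :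
    s.set col.toNat (PySem.List.pyGetD s col 0) = s := by
  have h : col.toNat < s.length := by unfold pvN at hlt; omega
  rw [PySem.List.pyGetD_of_nonneg _ _ hc]
  rw [show s.getD col.toNat 0 = s[col.toNat] from by simp [List.getD, h]]
  exact List.set_getElem_self h
lemma pv_delta (s : List Int) (col v : Int) (hc : 0 ≤ col) (hlt : col < pvN s) :
    pvCHsq (s.set col.toNat v) = pvRest s col + pvCF s col v := by
  set s' := s.set col.toNat v with hs'
  have hN : pvN s' = pvN s := by simp [pvN, hs']
  have hmem : col ∈ Finset.Ico 0 (pvN s') := by rw [hN]; exact Finset.mem_Ico.mpr ⟨hc, hlt⟩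
  rw [pv_split s' col hmem]
  have hrest : pvRest s' col = pvRest s col := by
    unfold pvRest
    rw [hN]
    apply Finset.sum_congr rfl; intro i hi
    apply Finset.sum_congr rfl; intro j hj
    by_cases hcond : i < j ∧ i ≠ col ∧ j ≠ col
    · rw [if_pos hcond, if_pos hcond]
      unfold pvF
      rw [pv_get_set_ne s col v i hc (Finset.mem_Ico.mp hi).1 hcond.2.1,
        pv_get_set_ne s col v j hc (Finset.mem_Ico.mp hj).1 hcond.2.2]
    · rw [if_neg hcond, if_neg hcond]
  have hedge : (∑ j ∈ Finset.Ico 0 (pvN s'), if col < j then pvF s' col j else 0)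
      + (∑ i ∈ Finset.Ico 0 (pvN s'), if i < col then pvF s' i col else 0)
      = pvCF s col v := by
    rw [← Finset.sum_add_distrib]
    unfold pvCF
    rw [hN]
    apply Finset.sum_congr rfl; intro j hj
    have hj0 : 0 ≤ j := (Finset.mem_Ico.mp hj).1
    by_cases hne : j = col
    · subst hne
      simp [pvG]
    · have h1 : pvF s' j col = pvF s' col j := pvF_symm s' j col
      have h2 : pvF s' col j = pvG s col v j := by
        unfold pvF pvG
        rw [pv_get_set_self s col v hc hlt, pv_get_set_ne s col v j hc hj0 hne]
        apply if_congr _ rfl rfl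
        constructor
        · rintro (h | h)
          · exact ⟨hne, Or.inl h.symm⟩
          · refine ⟨hne, Or.inr ?_⟩
            rw [abs_sub_comm, abs_sub_comm j col]
            exact h
        · rintro ⟨-, h | h⟩
          · exact Or.inl h.symm
          · refine Or.inr ?_
            rw [abs_sub_comm, abs_sub_comm col j]
            exact h
      rw [h1, h2]
      rcases lt_trichotomy j col with h | h | h
      · simp [h, not_lt.mpr (le_of_lt h)]
      · exact absurd h hne
      · simp [h, not_lt.mpr (le_of_lt h)]
  rw [hrest, add_assoc, hedge]
lemma pv_double (s : List Int) :
    ∑ i ∈ Finset.Ico 0 (pvN s), pvCF s i (PySem.List.pyGetD s i 0) = 2 * pvCHsq s := by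
  have hG : ∀ i j : Int, pvG s i (PySem.List.pyGetD s i 0) j
      = if j ≠ i then pvF s j i else 0 := by
    intro i j
    unfold pvG pvF
    rw [ite_and]
  have hsplit : ∀ i j : Int, (if j ≠ i then pvF s j i else 0)
      = (if j < i then pvF s j i else 0) + (if i < j then pvF s j i else 0) := by
    intro i j
    rcases lt_trichotomy j i with h | h | h
    · simp [h, ne_of_lt h, not_lt.mpr (le_of_lt h)]
    · simp [h]
    · simp [h, (ne_of_lt h).symm, not_lt.mpr (le_of_lt h)]
  unfold pvCF
  calc ∑ i ∈ Finset.Ico 0 (pvN s), ∑ j ∈ Finset.Ico 0 (pvN s), pvG s i (PySem.List.pyGetD s i 0) j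
      = (∑ i ∈ Finset.Ico 0 (pvN s), ∑ j ∈ Finset.Ico 0 (pvN s), if j < i then pvF s j i else 0)
        + (∑ i ∈ Finset.Ico 0 (pvN s), ∑ j ∈ Finset.Ico 0 (pvN s), if i < j then pvF s j i else 0) := by
        rw [← Finset.sum_add_distrib]
        apply Finset.sum_congr rfl; intro i _
        rw [← Finset.sum_add_distrib]
        apply Finset.sum_congr rfl; intro j _
        rw [hG, hsplit]
    _ = pvCHsq s + pvCHsq s := by
        congr 1
        · rw [Finset.sum_comm]
          rfl
        · unfold pvCHsq
          apply Finset.sum_congr rfl; intro i _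
          apply Finset.sum_congr rfl; intro j _
          rw [pvF_symm]
    _ = 2 * pvCHsq s := by ring
lemma pv_base (s : List Int) :
    PySem.Int.floordiv (((PySem.List.pyRange 0 (pvN s)).map
        (fun i => pv_conflicts s (pvN s) i (PySem.List.pyGetD s i 0))).sum) 2
      = compute_heurestic s := by
  rw [pv_sum_pyRange, Finset.sum_congr rfl (fun i _ => pv_CF_eq s i _), pv_double,
    PySem.Int.floordiv_eq_ediv_of_pos (by norm_num),
    Int.mul_ediv_cancel_left _ (by norm_num), pv_CH_sq]

lemma pv_h (s : List Int) (col row : Int) (hc : 0 ≤ col) (hlt : col < pvN s) :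
    compute_heurestic (s.set col.toNat row)
      = compute_heurestic s - pv_conflicts s (pvN s) col (PySem.List.pyGetD s col 0)
        + pv_conflicts s (pvN s) col row := by
  have hbase : pvCHsq s = pvRest s col + pvCF s col (PySem.List.pyGetD s col 0) := by
    conv_lhs => rw [← pv_set_self s col hc hlt]
    exact pv_delta s col _ hc hlt
  rw [pv_CH_sq, pv_CH_sq, pv_CF_eq, pv_CF_eq, pv_delta s col row hc hlt, hbase]
  ring

lemma pv_slice_set (s : List Int) (col row : Int) (hc : 0 ≤ col) (hlt : col < pvN s) :
    PySem.List.slice s none (some col) ++ [row] ++ PySem.List.slice s (some (col + 1)) none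
      = s.set col.toNat row := by
  rw [PySem.List.slice_to s hc, PySem.List.slice_from s (by omega),
    List.set_eq_take_append_cons_drop, if_pos (by unfold pvN at hlt; omega)]
  have : (col + 1).toNat = col.toNat + 1 := by omega
  simp [this]
lemma pv_main (state : List Int) : get_best_neighbour state = get_best_neighbour_alt state := by
  have hA : get_best_neighbour state
      = (PySem.List.pyRange 0 (pvN state)).foldl (fun acc col =>
          (PySem.List.pyRange 0 (pvN state)).foldl (fun acc row =>
            if row ≠ PySem.List.pyGetD state col 0 then
              if compute_heurestic (state.set col.toNat row) < acc.2 then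
                (state.set col.toNat row, compute_heurestic (state.set col.toNat row)) else acc
            else acc) acc) (state, compute_heurestic state) := rfl
  have hB : get_best_neighbour_alt state
      = (PySem.List.pyRange 0 (pvN state)).foldl (fun acc col =>
          (PySem.List.pyRange 0 (pvN state)).foldl (fun acc row =>
            if row ≠ PySem.List.pyGetD state col 0 then
              if (PySem.Int.floordiv (((PySem.List.pyRange 0 (pvN state)).map
                    (fun i => pv_conflicts state (pvN state) i (PySem.List.pyGetD state i 0))).sum) 2)
                  - pv_conflicts state (pvN state) col (PySem.List.pyGetD state col 0)
                  + pv_conflicts state (pvN state) col row < acc.2 then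
                (PySem.List.slice state none (some col) ++ [row]
                  ++ PySem.List.slice state (some (col + 1)) none,
                 (PySem.Int.floordiv (((PySem.List.pyRange 0 (pvN state)).map
                    (fun i => pv_conflicts state (pvN state) i (PySem.List.pyGetD state i 0))).sum) 2)
                  - pv_conflicts state (pvN state) col (PySem.List.pyGetD state col 0)
                  + pv_conflicts state (pvN state) col row) else acc
            else acc) acc)
          (state, PySem.Int.floordiv (((PySem.List.pyRange 0 (pvN state)).map
            (fun i => pv_conflicts state (pvN state) i (PySem.List.pyGetD state i 0))).sum) 2) := rfl
  rw [hA, hB, pv_base]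
  apply PySem.List.foldl_congr_mem
  intro acc col hcol
  obtain ⟨hc0, hcN⟩ := PySem.List.mem_pyRange_one.mp hcol
  apply PySem.List.foldl_congr_mem
  intro acc2 row hrow
  by_cases hne : row ≠ PySem.List.pyGetD state col 0
  · rw [if_pos hne, if_pos hne, pv_h state col row hc0 hcN, pv_slice_set state col row hc0 hcN]
  · rw [if_neg hne, if_neg hne]

-- ===== VERDICT (by name: the statement is the Claim_ definition above) =====
theorem get_best_neighbour_spec : Claim_equal_get_best_neighbour := by
  intro state _
  unfold Spec_get_best_neighbour
  exact pv_main state
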